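-- pv_equiv track=rewrite | github.com/bitwisecook/tcl-lsp | vm/machine.py | _list_escape
-- ===== SOURCE A (Python) =====
-- def _list_escape(s: str) -> str:
--     """Escape a string for inclusion in a Tcl list.
--
--     Uses brace quoting when the braces would be balanced (accounting
--     for backslash-escaped braces), and falls back to backslash escaping
--     otherwise — matching Tcl's own list representation rules.
--     """
--     if not s:
--         return "{}"
--
--     # Characters that need quoting in a Tcl list element
--     _NEEDS_QUOTING = frozenset(' \t\n\r{}[]$;"\\')
--
--     needs_quote = False
--     for ch in s:
--         if ch in _NEEDS_QUOTING:
--             needs_quote = True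
--             break
--     # Leading # also needs quoting (would start a comment)
--     if s[0] == "#":
--         needs_quote = True
--
--     if not needs_quote:
--         return s
--
--     # Try brace quoting — only works when braces are balanced
--     # (after accounting for all backslash-escaped chars) and the string
--     # contains no backslash-newline sequences or trailing backslash.
--     can_brace = True
--     depth = 0
--     i = 0
--     n = len(s)
--     while i < n:
--         ch = s[i]
--         if ch == "\\":
--             if i + 1 < n:
--                 if s[i + 1] == "\n":
--                     # Backslash-newline → unsafe for brace quoting
--                     can_brace = False
--                     break
--                 # Skip escaped char (\{, \}, \\, etc. don't affect depth)
--                 i += 2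
--                 continue
--             else:
--                 # Trailing backslash → unsafe for brace quoting
--                 can_brace = False
--                 break
--         if ch == "{":
--             depth += 1
--         elif ch == "}":
--             depth -= 1
--             if depth < 0:
--                 can_brace = False
--                 break
--         i += 1
--     if depth != 0:
--         can_brace = False
--
--     if can_brace:
--         return "{" + s + "}"
--
--     # Fall back to backslash escaping
--     out: list[str] = []
--     for ch in s:
--         if ch in '{}[]$";\\':
--             out.append("\\" + ch)
--         elif ch == " ":
--             out.append("\\ ")
--         elif ch == "\t":
--             out.append("\\t")
--         elif ch == "\n":
--             out.append("\\n")
--         elif ch == "\r":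
--             out.append("\\r")
--         elif ch == "#" and not out:
--             out.append("\\#")
--         else:
--             out.append(ch)
--     return "".join(out)
-- ===== SOURCE B (Python) =====
-- _NEEDS = ' \t\n\r{}[]$;"\\'
--
--
-- def _strip_escapes(s: str):
--     """Remove every backslash-escape pair by jumping between backslashes;
--     None if a backslash precedes a newline or ends the string."""
--     pieces = []
--     i = 0
--     while True:
--         j = s.find('\\', i)
--         if j < 0:
--             pieces.append(s[i:])
--             return ''.join(pieces)
--         pieces.append(s[i:j])
--         if j + 1 >= len(s) or s[j + 1] == '\n':
--             return None
--         i = j + 2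
--
--
-- def _list_escape(s: str) -> str:
--     if not s:
--         return '{}'
--     if s[0] != '#' and not any(ch in _NEEDS for ch in s):
--         return s
--     # Brace quoting is safe iff, with escape pairs stripped, the brace
--     # word (all non-braces dropped) cancels to nothing under repeated
--     # deletion of adjacent '{}' pairs (the Dyck-word reduction, which is
--     # exactly "balanced and never dipping negative").
--     cleaned = _strip_escapes(s)
--     if cleaned is not None:
--         braces = ''.join(ch for ch in cleaned if ch in '{}')
--         while '{}' in braces:
--             braces = braces.replace('{}', '')
--         if not braces:
--             return '{' + s + '}'
--     # Backslash escaping via staged whole-string replace passes.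
--     out = s.replace('\\', '\\\\')
--     for ch in '{}[]$";':
--         out = out.replace(ch, '\\' + ch)
--     out = out.replace(' ', '\\ ').replace('\t', '\\t')
--     out = out.replace('\n', '\\n').replace('\r', '\\r')
--     return ('\\' if s[0] == '#' else '') + out
-- ===== Notes on version B (the rewrite author's own statement) =====
-- stated objective: alternative
-- what changed: The stateful index-skipping brace-balance loop is replaced by staged passes (strip escape pairs by jumping between backslashes, filter to braces, then cancel adjacent '{}' pairs by repeated whole-string replace - the Dyck-word reduction), and the per-character if/elif escaping loop is replaced by twelve chained whole-string str.replace passes.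
import Mathlib
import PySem

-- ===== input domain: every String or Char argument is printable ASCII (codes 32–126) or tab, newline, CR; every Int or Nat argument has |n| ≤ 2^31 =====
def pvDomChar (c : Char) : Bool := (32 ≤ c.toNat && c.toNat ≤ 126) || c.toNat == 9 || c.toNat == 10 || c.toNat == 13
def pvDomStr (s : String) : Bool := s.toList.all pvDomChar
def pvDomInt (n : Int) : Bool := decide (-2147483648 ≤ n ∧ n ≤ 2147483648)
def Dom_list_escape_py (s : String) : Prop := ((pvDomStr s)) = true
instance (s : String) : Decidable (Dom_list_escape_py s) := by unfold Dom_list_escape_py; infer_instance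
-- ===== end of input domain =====

-- B replaces A's single stateful scans by staged passes: escape pairs are stripped by jumping
-- between backslashes, brace balance is checked by the Dyck-word reduction (repeatedly deleting
-- adjacent "{}" via str.replace), and escaping is done by chained whole-string replace passes
-- (objective: alternative algorithm, no speed claim).

-- ===== PORT A =====
def aNeedsList : List Char := [' ', '\t', '\n', '\r', '{', '}', '[', ']', '$', ';', '"', '\\']

def aNeedsQuote : List Char → Bool
  | [] => false
  | c :: rest => if aNeedsList.contains c then true else aNeedsQuote rest

-- A's index loop: skipping i += 2 over an escaped pair = dropping two list cells
def aBraceLoop : List Char → Int → Option Int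
  | [], d => some d
  | ['\\'], _ => none
  | '\\' :: c :: rest, d => if c = '\n' then none else aBraceLoop rest d
  | '{' :: rest, d => aBraceLoop rest (d + 1)
  | '}' :: rest, d => if d - 1 < 0 then none else aBraceLoop rest (d - 1)
  | _ :: rest, d => aBraceLoop rest d

def aSpecials : List Char := ['{', '}', '[', ']', '$', '"', ';', '\\']

def aEscPiece (ch : Char) (outEmpty : Bool) : String :=
  if aSpecials.contains ch then "\\" ++ String.singleton ch
  else if ch = ' ' then "\\ "
  else if ch = '\t' then "\\t"
  else if ch = '\n' then "\\n"
  else if ch = '\r' then "\\r"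
  else if ch = '#' ∧ outEmpty = true then "\\#"
  else String.singleton ch

def aEscLoop : List Char → List String → List String
  | [], out => out
  | ch :: rest, out => aEscLoop rest (out ++ [aEscPiece ch out.isEmpty])

def list_escape_py (s : String) : String :=
  match s.toList with
  | [] => "{}"
  | c :: _ =>
    let needsQuote := aNeedsQuote s.toList || (c == '#')
    if !needsQuote then s
    else
      let canBrace : Bool := match aBraceLoop s.toList 0 with
        | some d => d == 0
        | none => false
      if canBrace then "{" ++ s ++ "}"
      else PySem.Str.join "" (aEscLoop s.toList [])

-- ===== PORT B =====
def bNeeds : List Char := [' ', '\t', '\n', '\r', '{', '}', '[', ']', '$', ';', '"', '\\']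

-- _strip_escapes: jump to the next backslash (the chunk before it is the segment the
-- find/slice loop appends), fail on backslash-newline or trailing backslash, skip the pair.
def bStrip (l : List Char) : Option (List Char) :=
  let seg := l.takeWhile (· ≠ '\\')
  match h : l.dropWhile (· ≠ '\\') with
  | [] => some seg
  | [_] => none
  | _ :: d :: rest' => if d = '\n' then none else (bStrip rest').map (seg ++ ·)
termination_by l.length
decreasing_by
  have hsub := (List.dropWhile_sublist (l := l) (p := fun c => decide (c ≠ '\\'))).length_le
  rw [h] at hsub; simp at hsub; omega

-- pyReplaceBB is Python's braces.replace('{}', '') (left-to-right, non-overlapping);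
-- it is proved equal to PySem.Chars.replace below and used for bReduce's termination.
def pyReplaceBB : List Char → List Char
  | [] => []
  | [c] => [c]
  | c :: d :: r => if c = '{' ∧ d = '}' then pyReplaceBB r else c :: pyReplaceBB (d :: r)

theorem pyReplaceBB_nil : pyReplaceBB [] = [] := rfl
theorem pyReplaceBB_one (c : Char) : pyReplaceBB [c] = [c] := rfl
theorem pyReplaceBB_two (c d : Char) (r : List Char) :
    pyReplaceBB (c :: d :: r) = if c = '{' ∧ d = '}' then pyReplaceBB r else c :: pyReplaceBB (d :: r) := rfl

theorem replaceBB_go (fuel : Nat) (l acc : List Char) (h : l.length ≤ fuel) :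
    PySem.Chars.replace.go ['{', '}'] [] fuel l acc = acc.reverse ++ pyReplaceBB l := by
  induction fuel generalizing l acc with
  | zero =>
    have : l = [] := by cases l <;> simp_all
    subst this; simp [PySem.Chars.replace.go, pyReplaceBB]
  | succ fuel ih =>
    match l with
    | [] => simp [PySem.Chars.replace.go, pyReplaceBB]
    | [c] =>
      rw [PySem.Chars.replace.go]
      have hp : List.isPrefixOf ['{', '}'] [c] = false := by simp [List.isPrefixOf]
      rw [if_neg (by simp [hp])]
      rw [ih [] (c :: acc) (by simp)]
      simp [pyReplaceBB_nil, pyReplaceBB_one]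
    | c :: d :: r =>
      rw [PySem.Chars.replace.go]
      simp only [List.length_cons] at h
      by_cases hcd : c = '{' ∧ d = '}'
      · obtain ⟨hc, hd⟩ := hcd; subst hc; subst hd
        have hp : List.isPrefixOf ['{', '}'] ('{' :: '}' :: r) = true := by
          simp [List.isPrefixOf]
        rw [if_pos hp]
        rw [show List.drop (['{', '}'] : List Char).length ('{' :: '}' :: r) = r from rfl]
        rw [ih r _ (by omega)]
        rw [pyReplaceBB_two, if_pos ⟨rfl, rfl⟩]
        simp
      · have hp : List.isPrefixOf ['{', '}'] (c :: d :: r) = false := by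
          simp [List.isPrefixOf]; intro h1 h2; exact hcd ⟨h1.symm, h2.symm⟩
        rw [if_neg (by simp [hp])]
        rw [ih (d :: r) (c :: acc) (by simp; omega)]
        rw [pyReplaceBB_two, if_neg hcd]
        simp

theorem replace_braces (l : List Char) :
    PySem.Chars.replace l ['{', '}'] [] = pyReplaceBB l := by
  rw [PySem.Chars.replace]
  simp only [List.isEmpty_cons, if_false, Bool.false_eq_true]
  exact replaceBB_go l.length l [] le_rfl

theorem length_pyReplaceBB_le (l : List Char) : (pyReplaceBB l).length ≤ l.length := by
  fun_induction pyReplaceBB l <;> simp_all <;> omega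

theorem length_pyReplaceBB_lt (l : List Char) (h : ['{', '}'] <:+: l) :
    (pyReplaceBB l).length < l.length := by
  fun_induction pyReplaceBB l with
  | case1 => simp at h
  | case2 c =>
    rcases h with ⟨pre, suf, hps⟩
    cases pre <;> simp_all
  | case3 c d r hcd ih =>
    have := length_pyReplaceBB_le r
    simp
    omega
  | case4 c d r hcd ih =>
    have hinf : ['{', '}'] <:+: (d :: r) := by
      rcases (List.infix_cons_iff.mp h) with hpre | hinf
      · exfalso
        rcases hpre with ⟨t, ht⟩
        simp at ht
        exact hcd ⟨ht.1.symm, ht.2.1.symm⟩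
      · exact hinf
    have := ih hinf
    simpa using Nat.succ_lt_succ this

theorem bReduce_dec (t : List Char) (h : PySem.Chars.isIn ['{', '}'] t = true) :
    (PySem.Chars.replace t ['{', '}'] []).length < t.length := by
  rw [replace_braces]
  exact length_pyReplaceBB_lt t ((PySem.Chars.isIn_iff_infix _ _).mp h)

-- while '{}' in braces: braces = braces.replace('{}', '')
def bReduce (t : List Char) : List Char :=
  if h : PySem.Chars.isIn ['{', '}'] t = true then bReduce (PySem.Chars.replace t ['{', '}'] []) else t
termination_by t.length
decreasing_by exact bReduce_dec t h

def bEscChain : List Char := ['{', '}', '[', ']', '$', '"', ';']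

-- the chained whole-string replace passes
def bEscape (s : String) : String :=
  let t := PySem.Str.replace s "\\" "\\\\"
  let t := bEscChain.foldl (fun t ch => PySem.Str.replace t (String.singleton ch) ("\\" ++ String.singleton ch)) t
  let t := PySem.Str.replace t " " "\\ "
  let t := PySem.Str.replace t "\t" "\\t"
  let t := PySem.Str.replace t "\n" "\\n"
  PySem.Str.replace t "\r" "\\r"

def list_escape_py_alt (s : String) : String :=
  match s.toList with
  | [] => "{}"
  | c :: _ =>
    if (c != '#') && s.toList.all (fun ch => !bNeeds.contains ch) then s
    else if (match bStrip s.toList with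
             | some cleaned => bReduce (cleaned.filter (fun ch => ch == '{' || ch == '}')) == ([] : List Char)
             | none => false) then "{" ++ s ++ "}"
    else (if c == '#' then "\\" else "") ++ bEscape s

-- ===== PRECONDITION & SPEC =====
def Spec_list_escape_py (s : String) (out : String) : Prop := out = list_escape_py_alt s
instance (s : String) (out : String) : Decidable (Spec_list_escape_py s out) := by unfold Spec_list_escape_py; infer_instance

-- ===== CLAIM (what is proved, stated in full; the proofs are below) =====
def Claim_equal_list_escape_py : Prop := ∀ (s : String), Dom_list_escape_py s → Spec_list_escape_py s (list_escape_py s)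

-- ===== LEMMAS AND PROOFS =====

theorem needsEq (l : List Char) : aNeedsQuote l = !(l.all fun ch => !bNeeds.contains ch) := by
  induction l with
  | nil => rfl
  | cons c rest ih =>
    show (if aNeedsList.contains c then true else aNeedsQuote rest) = _
    by_cases h : aNeedsList.contains c = true <;>
      simp_all [aNeedsList, bNeeds]

-- structural version of bStrip (the find/jump loop, one character at a time)
def bStripS : List Char → Option (List Char)
  | [] => some []
  | c :: t =>
    if c = '\\' then
      match t with
      | [] => none
      | d :: r => if d = '\n' then none else bStripS r
    else (bStripS t).map (c :: ·)

theorem bStripS_cons (c : Char) (t : List Char) :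
    bStripS (c :: t) = if c = '\\' then
      (match t with
       | [] => none
       | d :: r => if d = '\n' then none else bStripS r)
    else (bStripS t).map (c :: ·) := by
  conv_lhs => rw [bStripS.eq_def]

theorem bStripS_bs_one : bStripS ['\\'] = none := by
  rw [bStripS_cons, if_pos rfl]

theorem bStripS_bs_cons (d : Char) (r : List Char) :
    bStripS ('\\' :: d :: r) = if d = '\n' then none else bStripS r := by
  rw [bStripS_cons, if_pos rfl]

theorem bStripS_cons_ne (c : Char) (t : List Char) (h : ¬ c = '\\') :
    bStripS (c :: t) = (bStripS t).map (c :: ·) := by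
  rw [bStripS_cons, if_neg h]

theorem bStripS_clean (seg : List Char) (h : ∀ c ∈ seg, ¬ c = '\\') :
    bStripS seg = some seg := by
  induction seg with
  | nil => rfl
  | cons c t ih =>
    rw [bStripS_cons_ne c t (h c (by simp)), ih (fun x hx => h x (by simp [hx]))]
    rfl

theorem bStripS_seg (seg rest : List Char) (h : ∀ c ∈ seg, ¬ c = '\\') :
    bStripS (seg ++ '\\' :: rest) =
      (match rest with
       | [] => none
       | d :: r => if d = '\n' then none else (bStripS r).map (fun x => seg ++ x)) := by
  induction seg with
  | nil =>
    rw [List.nil_append]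
    cases rest with
    | nil => exact bStripS_bs_one
    | cons d r =>
      rw [bStripS_bs_cons]
      simp
  | cons c t ih =>
    rw [List.cons_append, bStripS_cons_ne c _ (h c (by simp)),
      ih (fun x hx => h x (by simp [hx]))]
    cases rest with
    | nil => rfl
    | cons d r =>
      by_cases hd : d = '\n'
      · simp [hd]
      · simp [hd, Option.map_map, Function.comp_def]

theorem bStrip_eq_aux : ∀ (n : Nat) (l : List Char), l.length ≤ n → bStrip l = bStripS l := by
  intro n
  induction n with
  | zero =>
    intro l hl
    have : l = [] := by cases l <;> simp_all
    subst this
    rw [bStrip]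
    rfl
  | succ n ih =>
    intro l hl
    have hsplit := List.takeWhile_append_dropWhile (p := fun c => decide (c ≠ '\\')) (l := l)
    have hclean : ∀ c ∈ l.takeWhile (fun c => decide (c ≠ '\\')), ¬ c = '\\' := by
      intro c hc
      have := List.mem_takeWhile_imp hc
      simpa using this
    rw [bStrip]
    split <;> rename_i heq
    · -- dropWhile = []: no backslash, bStripS l = some l
      conv_rhs => rw [← hsplit]
      rw [heq, List.append_nil, bStripS_clean _ hclean]
    · -- dropWhile = [x]: trailing backslash
      rename_i x
      have hx : x = '\\' := by
        have := List.head?_dropWhile_not (p := fun c => decide (c ≠ '\\')) (l := l)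
        rw [heq] at this
        simpa using this
      subst hx
      conv_rhs => rw [← hsplit]
      rw [heq, bStripS_seg _ _ hclean]
    · -- dropWhile = '\' :: d :: rest'
      rename_i x d rest'
      have hx : x = '\\' := by
        have := List.head?_dropWhile_not (p := fun c => decide (c ≠ '\\')) (l := l)
        rw [heq] at this
        simpa using this
      subst hx
      have hlen : rest'.length ≤ n := by
        have hsub := (List.dropWhile_sublist (l := l) (p := fun c => decide (c ≠ '\\'))).length_le
        rw [heq] at hsub
        simp at hsub
        omega
      conv_rhs => rw [← hsplit]
      rw [heq, bStripS_seg _ _ hclean]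
      rw [ih rest' hlen]

theorem bStrip_eq (l : List Char) : bStrip l = bStripS l :=
  bStrip_eq_aux l.length l le_rfl

-- the plain depth scan A performs on the escape-stripped text
def depthScan : List Char → Int → Option Int
  | [], d => some d
  | c :: r, d =>
    if c = '{' then depthScan r (d + 1)
    else if c = '}' then (if d - 1 < 0 then none else depthScan r (d - 1))
    else depthScan r d

theorem depthScan_nil (d : Int) : depthScan [] d = some d := rfl

theorem depthScan_cons (c : Char) (r : List Char) (d : Int) :
    depthScan (c :: r) d =
      if c = '{' then depthScan r (d + 1)
      else if c = '}' then (if d - 1 < 0 then none else depthScan r (d - 1))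
      else depthScan r d := by
  conv_lhs => rw [depthScan.eq_def]

theorem aBrace_eq (l : List Char) (d : Int) :
    aBraceLoop l d = (bStripS l).elim none (fun cl => depthScan cl d) := by
  fun_induction aBraceLoop l d with
  | case1 d => rfl
  | case2 d => rw [bStripS_bs_one]; rfl
  | case3 rest d =>
    rw [bStripS_bs_cons, if_pos rfl]
    rfl
  | case4 c rest d hc ih =>
    rw [bStripS_bs_cons, if_neg hc]
    exact ih
  | case5 rest d ih =>
    rw [ih, bStripS_cons_ne '{' rest (by decide)]
    cases bStripS rest with
    | none => rfl
    | some cl =>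
      show depthScan cl (d + 1) = depthScan ('{' :: cl) d
      rw [depthScan_cons, if_pos rfl]
  | case6 rest d hlt =>
    rw [bStripS_cons_ne '}' rest (by decide)]
    cases bStripS rest with
    | none => rfl
    | some cl =>
      show (none : Option Int) = depthScan ('}' :: cl) d
      rw [depthScan_cons, if_neg (by decide), if_pos rfl, if_pos hlt]
  | case7 rest d hlt ih =>
    rw [ih, bStripS_cons_ne '}' rest (by decide)]
    cases bStripS rest with
    | none => rfl
    | some cl =>
      show depthScan cl (d - 1) = depthScan ('}' :: cl) d
      rw [depthScan_cons, if_neg (by decide), if_pos rfl, if_neg hlt]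
  | case8 c rest d h1 h2 h3 h4 ih =>
    have hc : ¬ c = '\\' := by
      intro hh
      cases rest with
      | nil => exact h1 hh rfl
      | cons a b => exact h2 a b hh rfl
    have hop : ¬ c = '{' := fun hh => h3 hh
    have hcl : ¬ c = '}' := fun hh => h4 hh
    rw [ih, bStripS_cons_ne c rest hc]
    cases bStripS rest with
    | none => rfl
    | some cl =>
      show depthScan cl d = depthScan (c :: cl) d
      rw [depthScan_cons, if_neg hop, if_neg hcl]

theorem depthScan_filter (l : List Char) : ∀ d : Int,
    depthScan l d = depthScan (l.filter (fun ch => ch == '{' || ch == '}')) d := by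
  induction l with
  | nil => intro d; rfl
  | cons c r ih =>
    intro d
    by_cases hop : c = '{'
    · subst hop
      rw [show List.filter (fun ch => ch == '{' || ch == '}') ('{' :: r)
            = '{' :: List.filter (fun ch => ch == '{' || ch == '}') r by simp]
      conv_lhs => rw [depthScan_cons]
      conv_rhs => rw [depthScan_cons]
      rw [if_pos rfl, if_pos rfl]
      exact ih _
    by_cases hcl : c = '}'
    · subst hcl
      rw [show List.filter (fun ch => ch == '{' || ch == '}') ('}' :: r)
            = '}' :: List.filter (fun ch => ch == '{' || ch == '}') r by simp]
      conv_lhs => rw [depthScan_cons]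
      conv_rhs => rw [depthScan_cons]
      rw [if_neg (show ¬('}' : Char) = '{' by decide),
        if_neg (show ¬('}' : Char) = '{' by decide), if_pos rfl, if_pos rfl]
      by_cases hlt : d - 1 < 0
      · rw [if_pos hlt, if_pos hlt]
      · rw [if_neg hlt, if_neg hlt]
        exact ih _
    · rw [show List.filter (fun ch => ch == '{' || ch == '}') (c :: r)
            = List.filter (fun ch => ch == '{' || ch == '}') r by simp [hop, hcl]]
      rw [depthScan_cons, if_neg hop, if_neg hcl]
      exact ih d

theorem depthScan_pyReplaceBB (l : List Char) : ∀ d : Int, 0 ≤ d →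
    depthScan (pyReplaceBB l) d = depthScan l d := by
  fun_induction pyReplaceBB l with
  | case1 => intro d _; rfl
  | case2 c => intro d _; rfl
  | case3 c d r hcd ih =>
    intro x hx
    obtain ⟨hc, hd⟩ := hcd; subst hc; subst hd
    rw [show depthScan ('{' :: '}' :: r) x = depthScan r x by
      rw [depthScan_cons, if_pos rfl, depthScan_cons,
        if_neg (show ¬('}' : Char) = '{' by decide), if_pos rfl, if_neg (by omega)]
      norm_num]
    exact ih x hx
  | case4 c d r hcd ih =>
    intro x hx
    conv_lhs => rw [depthScan_cons]
    conv_rhs => rw [depthScan_cons]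
    by_cases hop : c = '{'
    · rw [if_pos hop, if_pos hop]
      exact ih (x + 1) (by omega)
    by_cases hcl : c = '}'
    · rw [if_neg hop, if_neg hop, if_pos hcl, if_pos hcl]
      by_cases hlt : x - 1 < 0
      · rw [if_pos hlt, if_pos hlt]
      · rw [if_neg hlt, if_neg hlt]
        exact ih (x - 1) (by omega)
    · rw [if_neg hop, if_neg hop, if_neg hcl, if_neg hcl]
      exact ih x hx

theorem depthScan_bReduce (t : List Char) :
    depthScan (bReduce t) 0 = depthScan t 0 := by
  fun_induction bReduce t with
  | case1 t h ih =>
    rw [ih, replace_braces]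
    exact depthScan_pyReplaceBB t 0 le_rfl
  | case2 t h => rfl

theorem bReduce_irred (t : List Char) :
    PySem.Chars.isIn ['{', '}'] (bReduce t) = false := by
  fun_induction bReduce t with
  | case1 t h ih => exact ih
  | case2 t h => simpa using h

theorem mem_pyReplaceBB (l : List Char) (x : Char) : x ∈ pyReplaceBB l → x ∈ l := by
  fun_induction pyReplaceBB l with
  | case1 => intro hx; simp_all
  | case2 c => intro hx; simp_all
  | case3 c d r hcd ih =>
    intro hx
    simp [ih hx]
  | case4 c d r hcd ih =>
    intro hx
    cases hx with
    | head => simp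
    | tail _ hx' => exact List.mem_cons_of_mem c (ih hx')

theorem mem_bReduce (t : List Char) (x : Char) (hx : x ∈ bReduce t) : x ∈ t := by
  fun_induction bReduce t with
  | case1 t h ih =>
    have := ih hx
    rw [replace_braces] at this
    exact mem_pyReplaceBB t x this
  | case2 t h => exact hx

theorem irred_shape (t : List Char) (hb : ∀ c ∈ t, c = '{' ∨ c = '}')
    (hni : ¬ ['{', '}'] <:+: t) :
    ∃ a b, t = List.replicate a '}' ++ List.replicate b '{' := by
  induction t with
  | nil => exact ⟨0, 0, rfl⟩
  | cons c r ih =>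
    have hnr : ¬ ['{', '}'] <:+: r := fun h => hni (List.infix_cons h)
    obtain ⟨a, b, hr⟩ := ih (fun x hx => hb x (by simp [hx])) hnr
    rcases hb c (by simp) with hc | hc
    · -- c = '{' forces a = 0
      subst hc
      cases a with
      | zero =>
        exact ⟨0, b + 1, by simp [hr, List.replicate_succ]⟩
      | succ a' =>
        exfalso
        apply hni
        have : '{' :: r = '{' :: '}' :: (List.replicate a' '}' ++ List.replicate b '{') := by
          simp [hr, List.replicate_succ]
        rw [this]
        exact (List.prefix_iff_eq_take.mpr (by simp)).isInfix
    · subst hc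
      exact ⟨a + 1, b, by simp [hr, List.replicate_succ]⟩

theorem depthScan_replicate_open (b : Nat) : ∀ d : Int,
    depthScan (List.replicate b '{') d = some (d + b) := by
  induction b with
  | zero => intro d; simp [depthScan_nil]
  | succ b ih =>
    intro d
    rw [List.replicate_succ, depthScan_cons, if_pos rfl, ih (d + 1)]
    congr 1
    push_cast
    ring

theorem braceonly_iff (t : List Char) (hb : ∀ c ∈ t, c = '{' ∨ c = '}') :
    depthScan t 0 = some 0 ↔ bReduce t = [] := by
  have hchain := depthScan_bReduce t
  constructor
  · intro h
    rw [← hchain] at h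
    have hbr : ∀ c ∈ bReduce t, c = '{' ∨ c = '}' := fun x hx => hb x (mem_bReduce t x hx)
    have hni : ¬ ['{', '}'] <:+: bReduce t :=
      (PySem.Chars.isIn_eq_false_iff _ _).mp (bReduce_irred t)
    obtain ⟨a, b, hab⟩ := irred_shape (bReduce t) hbr hni
    rw [hab] at h
    cases a with
    | zero =>
      rw [List.replicate_zero, List.nil_append, depthScan_replicate_open b 0] at h
      have h' : (0 : Int) + b = 0 := by injection h
      have hb0 : b = 0 := by omega
      rw [hab, hb0, List.replicate_zero, List.replicate_zero, List.append_nil]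
    | succ a' =>
      exfalso
      rw [List.replicate_succ, List.cons_append, depthScan_cons,
        if_neg (by decide), if_pos rfl, if_pos (by omega)] at h
      simp at h
  · intro h
    rw [← hchain, h]
    rfl

theorem canBrace_eq (l : List Char) :
    (match aBraceLoop l 0 with | some d => d == 0 | none => false)
      = (match bStrip l with
         | some cleaned => bReduce (cleaned.filter (fun ch => ch == '{' || ch == '}')) == ([] : List Char)
         | none => false) := by
  rw [bStrip_eq, aBrace_eq l 0]
  cases h : bStripS l with
  | none => rfl
  | some cl =>
    simp only [Option.elim]
    rw [depthScan_filter cl 0]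
    set t := cl.filter (fun ch => ch == '{' || ch == '}') with ht
    have hbrace : ∀ c ∈ t, c = '{' ∨ c = '}' := by
      intro c hc
      rw [ht] at hc
      have := List.of_mem_filter hc
      simpa using this
    have hiff := braceonly_iff t hbrace
    cases hd : depthScan t 0 with
    | none =>
      have : bReduce t ≠ [] := fun hh => by simp [hiff.mpr hh] at hd
      simp [this]
    | some d =>
      by_cases hd0 : d = 0
      · subst hd0
        have : bReduce t = [] := hiff.mp hd
        simp [this]
      · have : bReduce t ≠ [] := fun hh => by
          have := hiff.mpr hh
          rw [hd] at this
          exact hd0 (by injection this)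
        have h2 : (bReduce t == ([] : List Char)) = false := beq_eq_false_iff_ne.mpr this
        simp [h2, hd0]

-- the escaping passes: single-character replace is a per-character expansion
theorem replaceOne_go (c : Char) (nw : List Char) (fuel : Nat) :
    ∀ (l acc : List Char), l.length ≤ fuel →
    PySem.Chars.replace.go [c] nw fuel l acc
      = acc.reverse ++ l.flatMap (fun x => if x = c then nw else [x]) := by
  induction fuel with
  | zero =>
    intro l acc h
    have : l = [] := by cases l <;> simp_all
    subst this
    simp [PySem.Chars.replace.go]
  | succ fuel ih =>
    intro l acc h
    match l with
    | [] => simp [PySem.Chars.replace.go]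
    | x :: t =>
      rw [PySem.Chars.replace.go]
      simp only [List.length_cons] at h
      by_cases hx : x = c
      · subst hx
        rw [if_pos (by simp [List.isPrefixOf])]
        rw [show List.drop ([x] : List Char).length (x :: t) = t from rfl]
        rw [ih t _ (by omega)]
        simp
      · rw [if_neg (by simp [List.isPrefixOf]; intro hh; exact hx hh.symm)]
        rw [ih t _ (by omega)]
        simp [hx]

theorem replace_one (s : List Char) (c : Char) (nw : List Char) :
    PySem.Chars.replace s [c] nw = s.flatMap (fun x => if x = c then nw else [x]) := by
  rw [PySem.Chars.replace]
  simp only [List.isEmpty_cons, if_false, Bool.false_eq_true]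
  exact replaceOne_go c nw s.length s [] le_rfl

-- the canonical one-character escape value
def cEsc (x : Char) : List Char :=
  if x = '{' ∨ x = '}' ∨ x = '[' ∨ x = ']' ∨ x = '$' ∨ x = '"' ∨ x = ';' ∨ x = '\\' then ['\\', x]
  else if x = ' ' then ['\\', ' ']
  else if x = '\t' then ['\\', 't']
  else if x = '\n' then ['\\', 'n']
  else if x = '\r' then ['\\', 'r']
  else [x]

set_option maxHeartbeats 1000000 in
theorem bEscape_toList (s : String) : (bEscape s).toList = s.toList.flatMap cEsc := by
  unfold bEscape bEscChain
  simp only [List.foldl_cons, List.foldl_nil]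
  simp only [PySem.Str.toList_replace]
  rw [show ("\\" : String).toList = ['\\'] from rfl,
    show ("\\\\" : String).toList = ['\\', '\\'] from rfl,
    show (" " : String).toList = [' '] from rfl,
    show ("\\ " : String).toList = ['\\', ' '] from rfl,
    show ("\t" : String).toList = ['\t'] from rfl,
    show ("\\t" : String).toList = ['\\', 't'] from rfl,
    show ("\n" : String).toList = ['\n'] from rfl,
    show ("\\n" : String).toList = ['\\', 'n'] from rfl,
    show ("\r" : String).toList = ['\r'] from rfl,
    show ("\\r" : String).toList = ['\\', 'r'] from rfl]
  rw [show (String.singleton '{').toList = ['{'] from rfl,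
    show ("\\" ++ String.singleton '{').toList = ['\\', '{'] from rfl,
    show (String.singleton '}').toList = ['}'] from rfl,
    show ("\\" ++ String.singleton '}').toList = ['\\', '}'] from rfl,
    show (String.singleton '[').toList = ['['] from rfl,
    show ("\\" ++ String.singleton '[').toList = ['\\', '['] from rfl,
    show (String.singleton ']').toList = [']'] from rfl,
    show ("\\" ++ String.singleton ']').toList = ['\\', ']'] from rfl,
    show (String.singleton '$').toList = ['$'] from rfl,
    show ("\\" ++ String.singleton '$').toList = ['\\', '$'] from rfl,
    show (String.singleton '"').toList = ['"'] from rfl,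
    show ("\\" ++ String.singleton '"').toList = ['\\', '"'] from rfl,
    show (String.singleton ';').toList = [';'] from rfl,
    show ("\\" ++ String.singleton ';').toList = ['\\', ';'] from rfl]
  simp only [replace_one, List.flatMap_assoc]
  apply List.flatMap_congr
  intro x _
  by_cases h0 : x = '\\'
  · subst h0; decide
  by_cases h1 : x = '{'
  · subst h1; decide
  by_cases h2 : x = '}'
  · subst h2; decide
  by_cases h3 : x = '['
  · subst h3; decide
  by_cases h4 : x = ']'
  · subst h4; decide
  by_cases h5 : x = '$'
  · subst h5; decide
  by_cases h6 : x = '"'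
  · subst h6; decide
  by_cases h7 : x = ';'
  · subst h7; decide
  by_cases h8 : x = ' '
  · subst h8; decide
  by_cases h9 : x = '\t'
  · subst h9; decide
  by_cases h10 : x = '\n'
  · subst h10; decide
  by_cases h11 : x = '\r'
  · subst h11; decide
  · simp [cEsc, h0, h1, h2, h3, h4, h5, h6, h7, h8, h9, h10, h11]

theorem pieceToList (ch : Char) : (aEscPiece ch false).toList = cEsc ch := by
  by_cases h0 : ch = '{'
  · subst h0; decide
  by_cases h1 : ch = '}'
  · subst h1; decide
  by_cases h2 : ch = '['
  · subst h2; decide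
  by_cases h3 : ch = ']'
  · subst h3; decide
  by_cases h4 : ch = '$'
  · subst h4; decide
  by_cases h5 : ch = '"'
  · subst h5; decide
  by_cases h6 : ch = ';'
  · subst h6; decide
  by_cases h7 : ch = '\\'
  · subst h7; decide
  by_cases h8 : ch = ' '
  · subst h8; decide
  by_cases h9 : ch = '\t'
  · subst h9; decide
  by_cases h10 : ch = '\n'
  · subst h10; decide
  by_cases h11 : ch = '\r'
  · subst h11; decide
  · rw [show aEscPiece ch false = String.singleton ch by
      simp [aEscPiece, aSpecials, h0, h1, h2, h3, h4, h5, h6, h7, h8, h9, h10, h11]]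
    simp [cEsc, h0, h1, h2, h3, h4, h5, h6, h7, h8, h9, h10, h11]

theorem pieceTrue (ch : Char) :
    (aEscPiece ch true).toList = if ch = '#' then ['\\', '#'] else cEsc ch := by
  by_cases h : ch = '#'
  · subst h; decide
  · rw [if_neg h]
    rw [show aEscPiece ch true = aEscPiece ch false by simp [aEscPiece, h]]
    exact pieceToList ch

theorem aEscLoop_nonempty (l : List Char) (out : List String) (h : out ≠ []) :
    aEscLoop l out = out ++ l.map (fun ch => aEscPiece ch false) := by
  induction l generalizing out with
  | nil => simp [aEscLoop]
  | cons c rest ih =>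
    have he : out.isEmpty = false := by simpa using h
    rw [aEscLoop, he, ih _ (by simp)]
    simp

theorem join_empty_toList (L : List String) :
    (PySem.Str.join "" L).toList = (L.map String.toList).flatten := by
  induction L with
  | nil => rfl
  | cons x xs ih =>
    cases xs with
    | nil => simp [PySem.Str.toList_join, PySem.Chars.join_singleton]
    | cons y ys =>
      rw [PySem.Str.toList_join, show ("" : String).toList = ([] : List Char) from rfl] at ih
      rw [PySem.Str.toList_join, show ("" : String).toList = ([] : List Char) from rfl]
      simp only [List.map_cons] at ih ⊢
      rw [PySem.Chars.join_cons_cons, List.append_nil, ih, List.flatten_cons]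
      simp

-- ===== VERDICT (by name: the statement is the Claim_ definition above) =====
theorem list_escape_py_spec : Claim_equal_list_escape_py := by
  unfold Claim_equal_list_escape_py Spec_list_escape_py
  intro s _
  unfold list_escape_py list_escape_py_alt
  cases h : s.toList with
  | nil => rfl
  | cons c rest =>
    have hcond : (!(aNeedsQuote (c :: rest) || (c == '#')))
        = ((c != '#') && (c :: rest).all fun ch => !bNeeds.contains ch) := by
      rw [needsEq]
      cases hall : (c :: rest).all fun ch => !bNeeds.contains ch <;>
        cases hh : (c == '#') <;> simp [hh, bne]
    simp only [hcond]
    rw [canBrace_eq (c :: rest)]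
    cases hq : (c != '#') && (c :: rest).all fun ch => !bNeeds.contains ch with
    | true => simp
    | false =>
      simp only [Bool.false_eq_true, if_false]
      cases hbr : (match bStrip (c :: rest) with
         | some cleaned => bReduce (cleaned.filter (fun ch => ch == '{' || ch == '}')) == ([] : List Char)
         | none => false) with
      | true => simp
      | false =>
        simp only [Bool.false_eq_true, if_false]
        rw [← String.toList_inj]
        rw [aEscLoop, show (([] : List String).isEmpty) = true from rfl,
          aEscLoop_nonempty rest _ (by simp), List.nil_append]
        rw [join_empty_toList, List.singleton_append]
        simp only [List.map_cons, List.map_map, List.flatten_cons]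
        rw [show (String.toList ∘ fun ch => aEscPiece ch false)
              = cEsc from funext fun ch => pieceToList ch]
        rw [pieceTrue c]
        rw [String.toList_append, bEscape_toList, h]
        rw [List.flatMap_cons]
        rw [← List.flatMap_def]
        by_cases hc : c = '#'
        · subst hc
          rw [if_pos rfl, if_pos (show ('#' == '#') = true from rfl)]
          simp [cEsc]
        · rw [if_neg hc, if_neg (show ¬((c == '#') = true) by simpa using hc)]
          simp
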